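-- pv_equiv track=rewrite | github.com/GitMonsters/octotetrahedral-agi | arc-puzzle-catalog/re-arc/solves/3a2b291a/solver.py | _place_distinct_rows
-- ===== SOURCE A (Python) =====
-- def _place_distinct_rows(grid, guides, bg):
--     h = len(grid)
--     w = len(grid[0])
--     out = [[bg] * w for _ in range(h)]
--     guide_rows = {r for r, _ in guides}
--     for r, color in guides:
--         out[r] = [color] * w
--
--     ordered = sorted(guides)
--     for idx, (gr, color) in enumerate(ordered):
--         outer_side = -1 if idx == 0 else 1
--         inner_bound = ordered[idx + 1][0] if idx + 1 < len(ordered) else None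
--         lower_bound = ordered[idx - 1][0] if idx > 0 else None
--         for c in range(w):
--             rows = [r for r in range(h) if r != gr and r not in guide_rows and grid[r][c] == color]
--             if not rows:
--                 continue
--             src = min(rows, key=lambda r: (abs(r - gr), r))
--             side = -1 if src < gr else 1
--             dist = abs(src - gr)
--             between_guides = False
--             if side == 1 and inner_bound is not None and gr < src < inner_bound:
--                 between_guides = True
--             if side == -1 and lower_bound is not None and lower_bound < src < gr:
--                 between_guides = True
--             if idx == 0 and between_guides and dist > 4:
--                 continue
--             if idx == 0 and side == outer_side and dist == 1:
--                 continue
--             target = gr + side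
--             if 0 <= target < h:
--                 out[target][c] = color
--     return out
-- ===== SOURCE B (Python) =====
-- def _place_distinct_rows(grid, guides, bg):
--     h = len(grid)
--     w = len(grid[0])
--     guide_rows = {r for r, _ in guides}
--     out = [[bg] * w for _ in range(h)]
--     for r, color in guides:
--         out[r] = [color] * w
--
--     # One pass over the grid: per (column, color) key, the ascending list of
--     # matching non-guide rows.  Each guide then looks its color up directly
--     # instead of rescanning every row of the column.
--     index = {}
--     for r, row in enumerate(grid):
--         if r in guide_rows:
--             continue
--         for c, v in enumerate(row[:w]):
--             index.setdefault((c, v), []).append(r)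
--
--     ordered = sorted(guides)
--     if ordered:
--         gr, color = ordered[0]
--         nb = ordered[1][0] if len(ordered) > 1 else None
--         for c in range(w):
--             rows = index.get((c, color))
--             if not rows:
--                 continue
--             src = min(rows, key=lambda r: (abs(r - gr), r))
--             dist = abs(src - gr)
--             if nb is not None and gr < src < nb and dist > 4:
--                 continue
--             if src < gr and dist == 1:
--                 continue
--             target = gr + (-1 if src < gr else 1)
--             if 0 <= target < h:
--                 out[target][c] = color
--         for gr, color in ordered[1:]:
--             for c in range(w):
--                 rows = index.get((c, color))
--                 if not rows:
--                     continue
--                 src = min(rows, key=lambda r: (abs(r - gr), r))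
--                 target = gr + (-1 if src < gr else 1)
--                 if 0 <= target < h:
--                     out[target][c] = color
--     return out
-- ===== Notes on version B (the rewrite author's own statement) =====
-- stated objective: faster
-- what changed: Instead of rescanning every row of the grid for every (guide, column) pair, B builds in one pass a (column,color) -> ascending matching non-guide-rows index and each guide looks its color up directly; B also splits the guide loop so the first-guide-only skip rules leave the inner loop of the remaining guides plain.
import Mathlib
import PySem

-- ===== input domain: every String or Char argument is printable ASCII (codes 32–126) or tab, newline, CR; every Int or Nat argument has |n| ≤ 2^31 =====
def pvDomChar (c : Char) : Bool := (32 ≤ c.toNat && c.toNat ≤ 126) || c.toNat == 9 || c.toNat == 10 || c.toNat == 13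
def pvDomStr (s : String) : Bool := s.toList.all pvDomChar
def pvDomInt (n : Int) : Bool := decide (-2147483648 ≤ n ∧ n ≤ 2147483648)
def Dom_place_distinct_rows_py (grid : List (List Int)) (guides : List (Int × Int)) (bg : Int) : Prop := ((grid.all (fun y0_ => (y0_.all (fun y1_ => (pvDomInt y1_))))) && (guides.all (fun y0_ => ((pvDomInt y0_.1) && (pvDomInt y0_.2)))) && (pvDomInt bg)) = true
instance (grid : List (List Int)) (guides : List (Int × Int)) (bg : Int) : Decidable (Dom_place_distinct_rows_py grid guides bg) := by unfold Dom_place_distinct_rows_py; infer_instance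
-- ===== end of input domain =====

-- B replaces A's per-guide per-column rescan of every row by a per-(column,color)
-- row index built in one pass over the grid (objective: faster, as measured by the
-- timing run; tie-breaking and all placement rules are unchanged).

-- grid[r][c] (exact for 0 ≤ r < len grid, 0 ≤ c < len grid[r], the only uses inside Pre_)
def pvCell (grid : List (List Int)) (r c : Int) : Int :=
  PySem.List.pyGetD (PySem.List.pyGetD grid r []) c 0

-- out[r][c] = v (exact for in-range r, c, the only uses)
def pvSetCell (out : List (List Int)) (r c v : Int) : List (List Int) :=
  PySem.List.pySetD out r (PySem.List.pySetD (PySem.List.pyGetD out r []) c v)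

-- ===== PORT A =====
def place_distinct_rows_py (grid : List (List Int)) (guides : List (Int × Int)) (bg : Int) : List (List Int) :=
  let h : Int := grid.length
  let wN : Nat := (PySem.List.pyGetD grid 0 []).length        -- w = len(grid[0])
  let out0 := List.replicate grid.length (List.replicate wN bg)
  let guideRows : PySem.Set Int := PySem.Set.ofList (guides.map (·.1))
  let out1 := guides.foldl (fun out g => PySem.List.pySetD out g.1 (List.replicate wN g.2)) out0
  let ordered := PySem.List.sorted2 guides (·.1) (·.2)
  (PySem.List.enumerate ordered 0).foldl (fun out ig =>
    let idx := ig.1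
    let gr := ig.2.1
    let color := ig.2.2
    let outerSide : Int := if idx = 0 then -1 else 1
    let innerBound : Option Int :=
      if idx + 1 < (ordered.length : Int) then some (PySem.List.pyGetD ordered (idx + 1) (0, 0)).1 else none
    let lowerBound : Option Int :=
      if 0 < idx then some (PySem.List.pyGetD ordered (idx - 1) (0, 0)).1 else none
    (PySem.List.pyRange 0 (wN : Int) 1).foldl (fun out c =>
      let rows := (PySem.List.pyRange 0 h 1).filter (fun r =>
        decide (r ≠ gr) && !(PySem.Set.contains guideRows r) && (pvCell grid r c == color))
      if rows.isEmpty then out else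
      let src := (PySem.List.min2? rows (fun r => |r - gr|) (fun r => r)).getD 0
      let side : Int := if src < gr then -1 else 1
      let dist := |src - gr|
      let between :=
        (decide (side = 1) && (match innerBound with
          | some ib => decide (gr < src) && decide (src < ib)
          | none => false)) ||
        (decide (side = -1) && (match lowerBound with
          | some lb => decide (lb < src) && decide (src < gr)
          | none => false))
      if decide (idx = 0) && between && decide (4 < dist) then out
      else if decide (idx = 0) && decide (side = outerSide) && decide (dist = 1) then out
      else
        let target := gr + side
        if 0 ≤ target ∧ target < h then pvSetCell out target c color else out) out) out1

-- ===== PORT B =====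
def place_distinct_rows_py_alt (grid : List (List Int)) (guides : List (Int × Int)) (bg : Int) : List (List Int) :=
  let h : Int := grid.length
  let wN : Nat := (PySem.List.pyGetD grid 0 []).length
  let guideRows : PySem.Set Int := PySem.Set.ofList (guides.map (·.1))
  let out1 := guides.foldl (fun out g => PySem.List.pySetD out g.1 (List.replicate wN g.2))
    (List.replicate grid.length (List.replicate wN bg))
  -- one pass over the grid: (column, color) -> ascending matching non-guide rows
  let index : PySem.Dict (Int × Int) (List Int) :=
    (PySem.List.enumerate grid 0).foldl (fun d rw =>
      if PySem.Set.contains guideRows rw.1 then d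
      else (PySem.List.enumerate (PySem.List.slice rw.2 none (some (wN : Int))) 0).foldl
        (fun d cv => d.modify (cv.1, cv.2) [] (· ++ [rw.1])) d) PySem.Dict.empty
  let ordered := PySem.List.sorted2 guides (·.1) (·.2)
  match ordered with
  | [] => out1
  | (gr0, color0) :: rest =>
    -- first (outermost) guide: the two extra skip rules apply only to it
    let nb : Option Int := rest.head?.map (·.1)
    let out2 := (PySem.List.pyRange 0 (wN : Int) 1).foldl (fun out c =>
      let rows := index.getD (c, color0) []
      if rows.isEmpty then out else
      let src := (PySem.List.min2? rows (fun r => |r - gr0|) (fun r => r)).getD 0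
      let dist := |src - gr0|
      if (match nb with
        | some ib => decide (gr0 < src) && decide (src < ib)
        | none => false) && decide (4 < dist) then out
      else if decide (src < gr0) && decide (dist = 1) then out
      else
        let target := gr0 + (if src < gr0 then -1 else 1)
        if 0 ≤ target ∧ target < h then pvSetCell out target c color0 else out) out1
    -- remaining guides: plain nearest-cell placement
    rest.foldl (fun out g =>
      (PySem.List.pyRange 0 (wN : Int) 1).foldl (fun out c =>
        let rows := index.getD (c, g.2) []
        if rows.isEmpty then out else
        let src := (PySem.List.min2? rows (fun r => |r - g.1|) (fun r => r)).getD 0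
        let target := g.1 + (if src < g.1 then -1 else 1)
        if 0 ≤ target ∧ target < h then pvSetCell out target c g.2 else out) out) out2

-- ===== PRECONDITION & SPEC =====
-- Pre_ is exactly where the Python A returns: a nonempty grid (A reads grid[0]),
-- guide rows inside Python's index range [-h, h) (A assigns out[r]), and — unless
-- there are no guides, in which case the column scan never runs — every non-guide
-- row at least w = len(grid[0]) cells wide (A reads grid[r][c] for every c < w).
def Pre_place_distinct_rows_py (grid : List (List Int)) (guides : List (Int × Int)) (bg : Int) : Prop :=
  grid ≠ [] ∧
  (∀ g ∈ guides, -(grid.length : Int) ≤ g.1 ∧ g.1 < (grid.length : Int)) ∧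
  (guides = [] ∨ ∀ p ∈ PySem.List.enumerate grid 0,
    p.1 ∈ guides.map (·.1) ∨ (PySem.List.pyGetD grid 0 []).length ≤ p.2.length)
instance (grid : List (List Int)) (guides : List (Int × Int)) (bg : Int) : Decidable (Pre_place_distinct_rows_py grid guides bg) := by unfold Pre_place_distinct_rows_py; infer_instance

def pvWitness_place_distinct_rows_py : List (List Int) × (List (Int × Int)) × Int :=
  ([[1, 2], [3, 1]], [(0, 3)], 0)

def Spec_place_distinct_rows_py (grid : List (List Int)) (guides : List (Int × Int)) (bg : Int) (out : List (List Int)) : Prop := out = place_distinct_rows_py_alt grid guides bg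
instance (grid : List (List Int)) (guides : List (Int × Int)) (bg : Int) (out : List (List Int)) : Decidable (Spec_place_distinct_rows_py grid guides bg out) := by unfold Spec_place_distinct_rows_py; infer_instance

-- ===== CLAIM (what is proved, stated in full; the proofs are below) =====
def Claim_equal_place_distinct_rows_py : Prop := ∀ (grid : List (List Int)) (guides : List (Int × Int)) (bg : Int), Dom_place_distinct_rows_py grid guides bg → Pre_place_distinct_rows_py grid guides bg → Spec_place_distinct_rows_py grid guides bg (place_distinct_rows_py grid guides bg)


-- ===== LEMMAS AND PROOFS =====

-- filter of an enumeration by key equality picks (at most) the single matching index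
theorem pv_enum_filter (l : List Int) (s c color : Int) (h1 : s ≤ c) (h2 : c < s + l.length) :
    (PySem.List.enumerate l s).filter (fun cv => cv == (c, color)) =
      if l.getD (c - s).toNat 0 == color then [(c, color)] else [] := by
  induction l generalizing s with
  | nil => simp at h2; omega
  | cons x t ih =>
    rw [PySem.List.enumerate_cons]
    by_cases hc : s = c
    · subst hc
      have hrest : (PySem.List.enumerate t (s + 1)).filter (fun cv => cv == (s, color)) = [] := by
        rw [List.filter_eq_nil_iff]
        intro cv hcv
        rcases (PySem.List.mem_enumerate_iff t (s + 1) cv).1 hcv with ⟨k, hk, rfl⟩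
        simp only [beq_iff_eq, Prod.mk.injEq]
        rintro ⟨h, -⟩
        omega
      simp only [List.filter_cons, hrest, sub_self, Int.toNat_zero, List.getD_cons_zero]
      by_cases hx : x = color
      · subst hx; simp
      · simp [hx, Prod.ext_iff]
    · have h1' : s + 1 ≤ c := by omega
      have h2' : c < s + 1 + t.length := by simp at h2 ⊢; omega
      rw [List.filter_cons_of_neg (by simp [Prod.ext_iff]; intro h; omega)]
      rw [ih (s + 1) h1' h2']
      have : (c - s).toNat = (c - (s + 1)).toNat + 1 := by omega
      rw [this, List.getD_cons_succ]

-- getD after the inner index-building fold over one row's enumeration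
theorem pv_inner (rowl : List Int) (d : PySem.Dict (Int × Int) (List Int)) (s c color : Int)
    (h0 : 0 ≤ c) (h1 : c < rowl.length) :
    ((PySem.List.enumerate rowl 0).foldl (fun d cv => d.modify (cv.1, cv.2) [] (· ++ [s])) d).getD (c, color) [] =
      d.getD (c, color) [] ++ (if rowl.getD c.toNat 0 == color then [s] else []) := by
  have hmap : (PySem.List.enumerate rowl 0).foldl (fun d cv => d.modify (cv.1, cv.2) [] (· ++ [s])) d
      = ((PySem.List.enumerate rowl 0).map (fun cv => (cv, s))).foldl
          (fun d p => d.modify p.1 [] (· ++ [p.2])) d := by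
    rw [List.foldl_map]
  rw [hmap, PySem.Dict.getD_foldl_modify_append]
  congr 1
  rw [List.filter_map]
  have : ((fun p : (Int × Int) × Int => p.1 == (c, color)) ∘ (fun cv => (cv, s)))
      = (fun cv : Int × Int => cv == (c, color)) := rfl
  rw [this, pv_enum_filter rowl 0 c color h0 (by simpa using h1)]
  have hcc : (c - 0).toNat = c.toNat := by omega
  rw [hcc]
  by_cases h : rowl.getD c.toNat 0 == color
  · rw [if_pos h, if_pos h]; rfl
  · rw [if_neg h, if_neg h]; rfl

-- getD after the whole index-building fold, over any suffix of the grid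
theorem pv_index (guideRows : PySem.Set Int) (wN : Nat)
    (grid' : List (List Int)) (s : Int) (d : PySem.Dict (Int × Int) (List Int)) (c color : Int)
    (h0 : 0 ≤ c) (hcw : c < (wN : Int))
    (hW : ∀ p ∈ PySem.List.enumerate grid' s, PySem.Set.contains guideRows p.1 ∨ wN ≤ p.2.length) :
    ((PySem.List.enumerate grid' s).foldl (fun d rw =>
        if PySem.Set.contains guideRows rw.1 then d
        else (PySem.List.enumerate (PySem.List.slice rw.2 none (some (wN : Int))) 0).foldl
          (fun d cv => d.modify (cv.1, cv.2) [] (· ++ [rw.1])) d) d).getD (c, color) [] =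
      d.getD (c, color) [] ++
        ((PySem.List.enumerate grid' s).filter (fun p =>
          !(PySem.Set.contains guideRows p.1) && (PySem.List.pyGetD p.2 c 0 == color))).map (·.1) := by
  induction grid' generalizing s d with
  | nil => simp [PySem.List.enumerate]
  | cons row t ih =>
    rw [PySem.List.enumerate_cons] at hW ⊢
    simp only [List.foldl_cons, List.filter_cons]
    by_cases hg : PySem.Set.contains guideRows (s : Int)
    · rw [if_pos hg]
      have : (!PySem.Set.contains guideRows (s, row).1 && (PySem.List.pyGetD (s, row).2 c 0 == color)) = false := by
        simp only [hg, Bool.not_true, Bool.false_and]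
      rw [this]
      exact ih (s + 1) d (fun p hp => hW p (List.mem_cons_of_mem _ hp))
    · rw [if_neg hg]
      have hlen : wN ≤ row.length := by
        rcases hW (s, row) (List.mem_cons_self) with h | h
        · exact absurd h hg
        · exact h
      have hslice : PySem.List.slice row none (some (wN : Int)) = row.take wN :=
        PySem.List.slice_to_natCast row wN
      have hct : c.toNat < wN := by omega
      have hinner := pv_inner (row.take wN) d s c color h0
        (by rw [List.length_take]; omega)
      rw [ih (s + 1) _ (fun p hp => hW p (List.mem_cons_of_mem _ hp)), hslice, hinner]
      have hgetD : (row.take wN).getD c.toNat 0 = PySem.List.pyGetD row c 0 := by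
        rw [PySem.List.pyGetD_eq_getElem row 0 h0 (by omega)]
        rw [List.getD_eq_getElem?_getD, List.getElem?_take, if_pos hct,
          List.getElem?_eq_getElem (by omega)]
        rfl
      rw [hgetD]
      by_cases hcell : PySem.List.pyGetD row c 0 == color
      · rw [if_pos hcell]
        have : (!PySem.Set.contains guideRows (s, row).1 && (PySem.List.pyGetD (s, row).2 c 0 == color)) = true := by
          simp only [hg, Bool.not_false, Bool.true_and]; exact hcell
        rw [this]
        simp
      · rw [if_neg (by simpa using hcell)]
        have : (!PySem.Set.contains guideRows (s, row).1 && (PySem.List.pyGetD (s, row).2 c 0 == color)) = false := by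
          simp only [hg, Bool.not_false, Bool.true_and]
          exact Bool.eq_false_iff.mpr hcell
        rw [this]
        simp

-- A's per-column row scan equals the index lookup
theorem pv_rows (grid : List (List Int)) (guides : List (Int × Int)) (wN : Nat)
    (c gr color : Int) (h0 : 0 ≤ c) (hcw : c < (wN : Int))
    (hgr : gr ∈ guides.map (·.1))
    (hW : ∀ p ∈ PySem.List.enumerate grid 0, p.1 ∈ guides.map (·.1) ∨ wN ≤ p.2.length) :
    (PySem.List.pyRange 0 (grid.length : Int) 1).filter (fun r =>
        decide (r ≠ gr) && !(PySem.Set.contains (PySem.Set.ofList (guides.map (·.1))) r) && (pvCell grid r c == color)) =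
      ((PySem.List.enumerate grid 0).foldl (fun d rw =>
        if PySem.Set.contains (PySem.Set.ofList (guides.map (·.1))) rw.1 then d
        else (PySem.List.enumerate (PySem.List.slice rw.2 none (some (wN : Int))) 0).foldl
          (fun d cv => d.modify (cv.1, cv.2) [] (· ++ [rw.1])) d) PySem.Dict.empty).getD (c, color) [] := by
  have hW' : ∀ p ∈ PySem.List.enumerate grid 0,
      PySem.Set.contains (PySem.Set.ofList (guides.map (·.1))) p.1 ∨ wN ≤ p.2.length := by
    intro p hp
    rcases hW p hp with h | h
    · exact Or.inl ((PySem.Set.contains_iff _ _).2 ((PySem.Set.mem_ofList _ _).2 h))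
    · exact Or.inr h
  rw [pv_index _ _ _ _ _ _ _ h0 hcw hW', PySem.Dict.getD_empty, List.nil_append]
  rw [PySem.List.enumerate_eq_map_pyRange grid []]
  rw [List.filter_map, List.map_map]
  simp only [PySem.List.len_eq]
  have hmapid : ((fun x : Int × List Int => x.1) ∘ (fun j : Int => (j, PySem.List.pyGetD grid j []))) = id := rfl
  rw [hmapid, List.map_id]
  apply List.filter_congr
  intro r _
  by_cases hr : r = gr
  · subst hr
    have hcon : PySem.Set.contains (PySem.Set.ofList (guides.map (·.1))) r = true :=
      (PySem.Set.contains_iff _ _).2 ((PySem.Set.mem_ofList _ _).2 hgr)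
    simp only [Function.comp, hcon, Bool.not_true, Bool.false_and, Bool.and_false, decide_not]
  · simp only [Function.comp]
    simp only [decide_eq_true (show r ≠ gr from hr), Bool.true_and]
    rfl

-- proof-side names for subterms of the two ports (each is definitionally that subterm)
def pvGR (guides : List (Int × Int)) : PySem.Set Int := PySem.Set.ofList (guides.map (·.1))

def pvOut1 (grid : List (List Int)) (guides : List (Int × Int)) (bg : Int) (wN : Nat) : List (List Int) :=
  guides.foldl (fun out g => PySem.List.pySetD out g.1 (List.replicate wN g.2))
    (List.replicate grid.length (List.replicate wN bg))

def pvIndex (grid : List (List Int)) (guides : List (Int × Int)) (wN : Nat) : PySem.Dict (Int × Int) (List Int) :=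
  (PySem.List.enumerate grid 0).foldl (fun d rw =>
    if PySem.Set.contains (pvGR guides) rw.1 then d
    else (PySem.List.enumerate (PySem.List.slice rw.2 none (some (wN : Int))) 0).foldl
      (fun d cv => d.modify (cv.1, cv.2) [] (· ++ [rw.1])) d) PySem.Dict.empty

def pvACol (grid : List (List Int)) (guides : List (Int × Int)) (h : Int)
    (gr color idx outerSide : Int) (innerBound lowerBound : Option Int) :
    List (List Int) → Int → List (List Int) := fun out c =>
  let rows := (PySem.List.pyRange 0 h 1).filter (fun r =>
    decide (r ≠ gr) && !(PySem.Set.contains (pvGR guides) r) && (pvCell grid r c == color))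
  if rows.isEmpty then out else
  let src := (PySem.List.min2? rows (fun r => |r - gr|) (fun r => r)).getD 0
  let side : Int := if src < gr then -1 else 1
  let dist := |src - gr|
  let between :=
    (decide (side = 1) && (match innerBound with
      | some ib => decide (gr < src) && decide (src < ib)
      | none => false)) ||
    (decide (side = -1) && (match lowerBound with
      | some lb => decide (lb < src) && decide (src < gr)
      | none => false))
  if decide (idx = 0) && between && decide (4 < dist) then out
  else if decide (idx = 0) && decide (side = outerSide) && decide (dist = 1) then out
  else
    let target := gr + side
    if 0 ≤ target ∧ target < h then pvSetCell out target c color else out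

def pvBColFirst (grid : List (List Int)) (guides : List (Int × Int)) (wN : Nat) (h : Int)
    (gr0 color0 : Int) (nb : Option Int) : List (List Int) → Int → List (List Int) := fun out c =>
  let rows := (pvIndex grid guides wN).getD (c, color0) []
  if rows.isEmpty then out else
  let src := (PySem.List.min2? rows (fun r => |r - gr0|) (fun r => r)).getD 0
  let dist := |src - gr0|
  if (match nb with
    | some ib => decide (gr0 < src) && decide (src < ib)
    | none => false) && decide (4 < dist) then out
  else if decide (src < gr0) && decide (dist = 1) then out
  else
    let target := gr0 + (if src < gr0 then -1 else 1)
    if 0 ≤ target ∧ target < h then pvSetCell out target c color0 else out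

def pvBColRest (grid : List (List Int)) (guides : List (Int × Int)) (wN : Nat) (h : Int)
    (gr color : Int) : List (List Int) → Int → List (List Int) := fun out c =>
  let rows := (pvIndex grid guides wN).getD (c, color) []
  if rows.isEmpty then out else
  let src := (PySem.List.min2? rows (fun r => |r - gr|) (fun r => r)).getD 0
  let target := gr + (if src < gr then -1 else 1)
  if 0 ≤ target ∧ target < h then pvSetCell out target c color else out

def pvAStep (grid : List (List Int)) (guides : List (Int × Int)) (wN : Nat)
    (ordered : List (Int × Int)) : List (List Int) → Int × (Int × Int) → List (List Int) :=
  fun out ig =>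
    (PySem.List.pyRange 0 (wN : Int) 1).foldl
      (pvACol grid guides (grid.length : Int) ig.2.1 ig.2.2 ig.1 (if ig.1 = 0 then -1 else 1)
        (if ig.1 + 1 < (ordered.length : Int) then some (PySem.List.pyGetD ordered (ig.1 + 1) (0, 0)).1 else none)
        (if 0 < ig.1 then some (PySem.List.pyGetD ordered (ig.1 - 1) (0, 0)).1 else none)) out

-- sanity: the ports are definitionally these assemblies (placeholder defs of ports repeated here for scratch)


theorem pv_portA (grid : List (List Int)) (guides : List (Int × Int)) (bg : Int) :
    place_distinct_rows_py grid guides bg =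
      (PySem.List.enumerate (PySem.List.sorted2 guides (·.1) (·.2)) 0).foldl
        (pvAStep grid guides (PySem.List.pyGetD grid 0 []).length (PySem.List.sorted2 guides (·.1) (·.2)))
        (pvOut1 grid guides bg (PySem.List.pyGetD grid 0 []).length) := rfl

theorem pv_portB (grid : List (List Int)) (guides : List (Int × Int)) (bg : Int) :
    place_distinct_rows_py_alt grid guides bg =
      (match PySem.List.sorted2 guides (·.1) (·.2) with
       | [] => pvOut1 grid guides bg (PySem.List.pyGetD grid 0 []).length
       | (gr0, color0) :: rest =>
         rest.foldl (fun out g =>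
           (PySem.List.pyRange 0 ((PySem.List.pyGetD grid 0 []).length : Int) 1).foldl
             (pvBColRest grid guides (PySem.List.pyGetD grid 0 []).length (grid.length : Int) g.1 g.2) out)
           ((PySem.List.pyRange 0 ((PySem.List.pyGetD grid 0 []).length : Int) 1).foldl
             (pvBColFirst grid guides (PySem.List.pyGetD grid 0 []).length (grid.length : Int) gr0 color0
               (rest.head?.map (·.1))) (pvOut1 grid guides bg (PySem.List.pyGetD grid 0 []).length))) := rfl

-- per-column body equality, first (outermost) guide (idx = 0)
theorem pv_col_first (grid : List (List Int)) (guides : List (Int × Int)) (wN : Nat)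
    (gr0 color0 : Int) (nb : Option Int) (out : List (List Int)) (c : Int)
    (h0 : 0 ≤ c) (hcw : c < (wN : Int))
    (hgr : gr0 ∈ guides.map (·.1))
    (hW : ∀ p ∈ PySem.List.enumerate grid 0, p.1 ∈ guides.map (·.1) ∨ wN ≤ p.2.length) :
    pvACol grid guides (grid.length : Int) gr0 color0 0 (-1) nb none out c =
      pvBColFirst grid guides wN (grid.length : Int) gr0 color0 nb out c := by
  unfold pvACol pvBColFirst
  rw [show ((pvIndex grid guides wN).getD (c, color0) []) =
    (PySem.List.pyRange 0 (grid.length : Int) 1).filter (fun r =>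
      decide (r ≠ gr0) && !(PySem.Set.contains (pvGR guides) r) && (pvCell grid r c == color0))
    from (pv_rows grid guides wN c gr0 color0 h0 hcw hgr hW).symm]
  generalize (PySem.List.pyRange 0 (grid.length : Int) 1).filter (fun r =>
      decide (r ≠ gr0) && !(PySem.Set.contains (pvGR guides) r) && (pvCell grid r c == color0)) = rows
  cases hre : rows.isEmpty
  · simp only [hre, Bool.false_eq_true, if_false]
    generalize (PySem.List.min2? rows (fun r => |r - gr0|) (fun r => r)).getD 0 = src
    by_cases hs : src < gr0
    · have hnb : (match nb with
        | some ib => decide (gr0 < src) && decide (src < ib)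
        | none => false) = false := by
        cases nb with
        | none => rfl
        | some ib => simp; omega
      simp [hs, hnb]
    · simp [hs]
  · simp [hre]

-- per-column body equality, later guides (idx ≠ 0): A's two skip rules are vacuous
theorem pv_col_rest (grid : List (List Int)) (guides : List (Int × Int)) (wN : Nat)
    (gr color idx outerSide : Int) (ib lb : Option Int) (out : List (List Int)) (c : Int)
    (hidx : idx ≠ 0) (h0 : 0 ≤ c) (hcw : c < (wN : Int))
    (hgr : gr ∈ guides.map (·.1))
    (hW : ∀ p ∈ PySem.List.enumerate grid 0, p.1 ∈ guides.map (·.1) ∨ wN ≤ p.2.length) :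
    pvACol grid guides (grid.length : Int) gr color idx outerSide ib lb out c =
      pvBColRest grid guides wN (grid.length : Int) gr color out c := by
  unfold pvACol pvBColRest
  rw [show ((pvIndex grid guides wN).getD (c, color) []) =
    (PySem.List.pyRange 0 (grid.length : Int) 1).filter (fun r =>
      decide (r ≠ gr) && !(PySem.Set.contains (pvGR guides) r) && (pvCell grid r c == color))
    from (pv_rows grid guides wN c gr color h0 hcw hgr hW).symm]
  generalize (PySem.List.pyRange 0 (grid.length : Int) 1).filter (fun r =>
      decide (r ≠ gr) && !(PySem.Set.contains (pvGR guides) r) && (pvCell grid r c == color)) = rows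
  cases hre : rows.isEmpty
  · simp [hre, hidx]
  · simp [hre]

-- the tail of A's enumerated guide loop is B's plain loop
theorem pv_rest_fold (grid : List (List Int)) (guides : List (Int × Int)) (wN : Nat)
    (ordered rest : List (Int × Int)) (s : Int) (out : List (List Int))
    (hs : 1 ≤ s)
    (hmem : ∀ g ∈ rest, g.1 ∈ guides.map (·.1))
    (hW : ∀ p ∈ PySem.List.enumerate grid 0, p.1 ∈ guides.map (·.1) ∨ wN ≤ p.2.length) :
    (PySem.List.enumerate rest s).foldl (pvAStep grid guides wN ordered) out =
      rest.foldl (fun out g =>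
        (PySem.List.pyRange 0 (wN : Int) 1).foldl
          (pvBColRest grid guides wN (grid.length : Int) g.1 g.2) out) out := by
  induction rest generalizing s out with
  | nil => simp [PySem.List.enumerate]
  | cons g t ih =>
    rw [PySem.List.enumerate_cons, List.foldl_cons, List.foldl_cons]
    rw [ih (s + 1) _ (by omega) (fun g hg => hmem g (List.mem_cons_of_mem _ hg))]
    congr 1
    unfold pvAStep
    apply PySem.List.foldl_congr_mem
    intro acc c hc
    rcases PySem.List.mem_pyRange_one.1 hc with ⟨h0, hcw⟩
    exact pv_col_rest grid guides wN g.1 g.2 s _ _ _ acc c (by omega) h0 hcw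
      (hmem g List.mem_cons_self) hW

-- ===== VERDICT pieces =====
-- ===== VERDICT (the statements are the Claim_ definitions above) =====
theorem place_distinct_rows_py_spec : Claim_equal_place_distinct_rows_py := by
  intro grid guides bg _ hpre
  obtain ⟨hne, hbounds, hragged⟩ := hpre
  unfold Spec_place_distinct_rows_py
  rw [pv_portA, pv_portB]
  cases hord : PySem.List.sorted2 guides (·.1) (·.2) with
  | nil => rw [PySem.List.enumerate_nil]; rfl
  | cons g0 rest =>
    obtain ⟨gr0, color0⟩ := g0
    have hperm : ((gr0, color0) :: rest).Perm guides := by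
      rw [← hord]; exact PySem.List.sorted2_perm guides (·.1) (·.2) false
    have hW : ∀ p ∈ PySem.List.enumerate grid 0,
        p.1 ∈ guides.map (·.1) ∨ (PySem.List.pyGetD grid 0 []).length ≤ p.2.length := by
      rcases hragged with h | h
      · exfalso
        have := hperm.length_eq
        rw [h] at this
        simp at this
      · exact h
    have hmem : ∀ g ∈ (gr0, color0) :: rest, g.1 ∈ guides.map (·.1) := by
      intro g hg
      exact List.mem_map_of_mem (hperm.mem_iff.1 hg)
    rw [PySem.List.enumerate_cons, List.foldl_cons]
    show List.foldl (pvAStep grid guides (PySem.List.pyGetD grid 0 []).length ((gr0, color0) :: rest))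
        (pvAStep grid guides (PySem.List.pyGetD grid 0 []).length ((gr0, color0) :: rest)
          (pvOut1 grid guides bg (PySem.List.pyGetD grid 0 []).length) (0, gr0, color0))
        (PySem.List.enumerate rest 1) =
      List.foldl
        (fun out g =>
          List.foldl (pvBColRest grid guides (PySem.List.pyGetD grid 0 []).length ((grid.length : Int)) g.1 g.2) out
            (PySem.List.pyRange 0 ((PySem.List.pyGetD grid 0 []).length : Int) 1))
        (List.foldl
          (pvBColFirst grid guides (PySem.List.pyGetD grid 0 []).length ((grid.length : Int)) gr0 color0
            (Option.map (fun x => x.1) rest.head?))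
          (pvOut1 grid guides bg (PySem.List.pyGetD grid 0 []).length)
          (PySem.List.pyRange 0 ((PySem.List.pyGetD grid 0 []).length : Int) 1))
        rest
    rw [pv_rest_fold grid guides _ _ rest 1 _ le_rfl
      (fun g hg => hmem g (List.mem_cons_of_mem _ hg)) hW]
    congr 1
    -- first guide
    unfold pvAStep
    apply PySem.List.foldl_congr_mem
    intro acc c hc
    rcases PySem.List.mem_pyRange_one.1 hc with ⟨h0, hcw⟩
    have hib : (if (0 : Int) + 1 < (((gr0, color0) :: rest).length : Int)
        then some (PySem.List.pyGetD ((gr0, color0) :: rest) ((0 : Int) + 1) (0, 0)).1 else none)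
        = rest.head?.map (·.1) := by
      cases rest with
      | nil => simp
      | cons g1 t => simp [PySem.List.pyGetD]
    rw [hib]
    exact pv_col_first grid guides _ gr0 color0 _ acc c h0 hcw (hmem _ List.mem_cons_self) hW
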